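-- pv_equiv track=rewrite | github.com/MaxAnderson95/advent-of-code | 2025/1/solution.py | solution_part_one
-- ===== SOURCE A (Python) =====
-- class Dial:
--     def __init__(self) -> None:
--         self._position = 50
--         self._zero_count = 0
--
--     def forward(self, number: int = 1) -> None:
--         for i in range(number):
--             if self._position == 99:
--                 self._position = 0
--             else:
--                 self._position += 1
--
--             if self._position == 0:
--                 self._zero_count += 1
--
--     def reverse(self, number: int = 1) -> None:
--         for i in range(number):
--             if self._position == 0:
--                 self._position = 99
--             else:
--                 self._position -= 1
--
--             if self._position == 0:
--                 self._zero_count += 1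
--
--     @property
--     def position(self) -> int:
--         return self._position
--
--     @property
--     def zero_count(self) -> int:
--         return self._zero_count
--
-- def solution_part_one(input: list[str]) -> int:
--     d = Dial()
--     num_of_zeros: int = 0
--     for instruction in input:
--         if instruction.startswith("R"):
--             amt = int(instruction.split("R")[1])
--             d.forward(amt)
--         if instruction.startswith("L"):
--             amt = int(instruction.split("L")[1])
--             d.reverse(amt)
--
--         if d.position == 0:
--             num_of_zeros += 1
--
--     return num_of_zeros
-- ===== SOURCE B (Python) =====
-- def solution_part_one(input: list[str]) -> int:
--     position = 50
--     num_of_zeros = 0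
--     for instruction in input:
--         if instruction.startswith("R"):
--             position = (position + int(instruction.split("R")[1])) % 100
--         elif instruction.startswith("L"):
--             position = (position - int(instruction.split("L")[1])) % 100
--         if position == 0:
--             num_of_zeros += 1
--     return num_of_zeros
-- ===== Notes on version B (the rewrite author's own statement) =====
-- stated objective: simpler
-- what changed: Replaced the Dial class's one-step-per-unit stepping loops (forward/reverse iterate amt times) with a single modular-arithmetic update position = (position +/- amt) % 100 per instruction.
-- outside the precondition, e.g. on solution_part_one(['R-50']): A returns 0, B returns 1
import Mathlib
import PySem

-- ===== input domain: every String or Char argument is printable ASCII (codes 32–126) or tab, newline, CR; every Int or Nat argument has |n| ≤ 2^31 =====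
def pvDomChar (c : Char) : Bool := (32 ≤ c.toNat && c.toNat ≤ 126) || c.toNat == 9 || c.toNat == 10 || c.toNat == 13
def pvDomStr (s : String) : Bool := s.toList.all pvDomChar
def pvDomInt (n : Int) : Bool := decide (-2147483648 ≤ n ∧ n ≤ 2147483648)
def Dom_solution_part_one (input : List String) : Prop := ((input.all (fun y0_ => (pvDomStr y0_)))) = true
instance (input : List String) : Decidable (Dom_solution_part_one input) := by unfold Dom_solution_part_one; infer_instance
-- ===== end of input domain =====

-- B replaces A's Dial class and its one-step-per-unit stepping loops with a single modular-arithmetic update per instruction (objective: simpler).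

-- amount of an instruction: int(instruction.split(c)[1]); none exactly where Python raises.
-- (shared by both ports and Pre_: both Pythons extract the amount with this very expression)
def pvAmt (ins : String) (c : String) : Option Int :=
  (PySem.List.pyGet? ((PySem.Str.split? ins c).getD []) 1).bind PySem.Int.ofStr?

-- ===== PORT A =====
-- Dial state is (position, zero_count); range(number) steps one unit at a time.
def pvForward (d : Int × Int) (number : Int) : Int × Int :=
  (PySem.List.pyRange 0 number 1).foldl (fun d _ =>
    let pos := if d.1 == 99 then 0 else d.1 + 1
    (pos, if pos == 0 then d.2 + 1 else d.2)) d

def pvReverse (d : Int × Int) (number : Int) : Int × Int :=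
  (PySem.List.pyRange 0 number 1).foldl (fun d _ =>
    let pos := if d.1 == 0 then 99 else d.1 - 1
    (pos, if pos == 0 then d.2 + 1 else d.2)) d

-- the body of A's `for instruction in input` loop
def pvStepA (acc : (Int × Int) × Int) (instruction : String) : (Int × Int) × Int :=
  -- where Python would raise (amount unparsable) the port uses .getD 0; such inputs are outside Pre_
  let d := acc.1
  let d := if PySem.Str.startswith instruction "R" then
      pvForward d ((pvAmt instruction "R").getD 0)
    else d
  let d := if PySem.Str.startswith instruction "L" then
      pvReverse d ((pvAmt instruction "L").getD 0)
    else d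
  (d, if d.1 == 0 then acc.2 + 1 else acc.2)

def solution_part_one (input : List String) : Int :=
  (input.foldl pvStepA ((50, 0), 0)).2

-- ===== PORT B =====
-- the body of B's loop: one modular update, state (position, num_of_zeros)
def pvStepB (acc : Int × Int) (instruction : String) : Int × Int :=
  let pos :=
    if PySem.Str.startswith instruction "R" then
      PySem.Int.mod (acc.1 + (pvAmt instruction "R").getD 0) 100
    else if PySem.Str.startswith instruction "L" then
      PySem.Int.mod (acc.1 - (pvAmt instruction "L").getD 0) 100
    else acc.1
  (pos, if pos == 0 then acc.2 + 1 else acc.2)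

def solution_part_one_alt (input : List String) : Int :=
  (input.foldl pvStepB (50, 0)).2

-- ===== PRECONDITION & SPEC =====
-- Pre_ excludes instructions whose R/L amount makes int() raise (A raises ValueError there) and
-- instructions with a NEGATIVE parsed amount, a corner no puzzle input specifies: A's range(amt) is
-- empty so A silently does not move, while B rotates backwards — both defensible, neither intended.
def Pre_solution_part_one (input : List String) : Prop :=
  ∀ ins ∈ input,
    (PySem.Str.startswith ins "R" = true → 0 ≤ (pvAmt ins "R").getD (-1)) ∧
    (PySem.Str.startswith ins "L" = true → 0 ≤ (pvAmt ins "L").getD (-1))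
instance (input : List String) : Decidable (Pre_solution_part_one input) := by
  unfold Pre_solution_part_one; infer_instance

def pvWitness_solution_part_one : List String := ["R50", "L1", "R1", "x", "L99"]

def Spec_solution_part_one (input : List String) (out : Int) : Prop := out = solution_part_one_alt input
instance (input : List String) (out : Int) : Decidable (Spec_solution_part_one input out) := by unfold Spec_solution_part_one; infer_instance

-- ===== CLAIM (what is proved, stated in full; the proofs are below) =====
def Claim_equal_solution_part_one : Prop := ∀ (input : List String), Dom_solution_part_one input → Pre_solution_part_one input → Spec_solution_part_one input (solution_part_one input)

-- ===== LEMMAS AND PROOFS =====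

-- forward by n unit steps lands on (p + n) mod 100
theorem pvForward_fst (n : Nat) : ∀ (p z : Int), 0 ≤ p → p < 100 →
    (pvForward (p, z) (n : Int)).1 = (p + n) % 100 := by
  induction n with
  | zero => intro p z h0 h1; simp [pvForward, PySem.List.pyRange]; omega
  | succ n ih =>
    intro p z h0 h1
    have hsplit : PySem.List.pyRange 0 ((n : Int) + 1) 1
        = PySem.List.pyRange 0 (n : Int) 1 ++ PySem.List.pyRange (n : Int) ((n : Int) + 1) 1 :=
      PySem.List.pyRange_one_append 0 (n : Int) ((n : Int) + 1) (by omega) (by omega)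
    have hlast : PySem.List.pyRange (n : Int) ((n : Int) + 1) 1 = [(n : Int)] := by
      rw [PySem.List.pyRange_one_cons (by omega)]
      simp [PySem.List.pyRange]
    have hfold : pvForward (p, z) ((n : Int) + 1)
        = (fun (d : Int × Int) (_ : Int) =>
            let pos := if d.1 == 99 then 0 else d.1 + 1
            (pos, if pos == 0 then d.2 + 1 else d.2)) (pvForward (p, z) (n : Int)) (n : Int) := by
      unfold pvForward
      rw [hsplit, List.foldl_append, hlast]
      simp
    have hq := ih p z h0 h1
    have hb : 0 ≤ ((p + (n : Int)) % 100) ∧ ((p + (n : Int)) % 100) < 100 :=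
      ⟨by omega, by omega⟩
    push_cast
    rw [hfold]
    simp only [hq]
    by_cases hc : ((p + (n : Int)) % 100) = 99
    · simp [hc]; omega
    · simp [hc]; omega

-- reverse by n unit steps lands on (p - n) mod 100
theorem pvReverse_fst (n : Nat) : ∀ (p z : Int), 0 ≤ p → p < 100 →
    (pvReverse (p, z) (n : Int)).1 = (p - n) % 100 := by
  induction n with
  | zero => intro p z h0 h1; simp [pvReverse, PySem.List.pyRange]; omega
  | succ n ih =>
    intro p z h0 h1
    have hsplit : PySem.List.pyRange 0 ((n : Int) + 1) 1
        = PySem.List.pyRange 0 (n : Int) 1 ++ PySem.List.pyRange (n : Int) ((n : Int) + 1) 1 :=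
      PySem.List.pyRange_one_append 0 (n : Int) ((n : Int) + 1) (by omega) (by omega)
    have hlast : PySem.List.pyRange (n : Int) ((n : Int) + 1) 1 = [(n : Int)] := by
      rw [PySem.List.pyRange_one_cons (by omega)]
      simp [PySem.List.pyRange]
    have hfold : pvReverse (p, z) ((n : Int) + 1)
        = (fun (d : Int × Int) (_ : Int) =>
            let pos := if d.1 == 0 then 99 else d.1 - 1
            (pos, if pos == 0 then d.2 + 1 else d.2)) (pvReverse (p, z) (n : Int)) (n : Int) := by
      unfold pvReverse
      rw [hsplit, List.foldl_append, hlast]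
      simp
    have hq := ih p z h0 h1
    have hb : 0 ≤ ((p - (n : Int)) % 100) ∧ ((p - (n : Int)) % 100) < 100 :=
      ⟨by omega, by omega⟩
    push_cast
    rw [hfold]
    simp only [hq]
    by_cases hc : ((p - (n : Int)) % 100) = 0
    · simp [hc]; omega
    · simp [hc]; omega

-- a string cannot start with both "R" and "L"
theorem not_start_RL (s : String) (hR : PySem.Str.startswith s "R" = true) :
    PySem.Str.startswith s "L" = false := by
  by_contra h
  have hL : PySem.Str.startswith s "L" = true := by
    cases hh : PySem.Str.startswith s "L" with
    | true => rfl
    | false => exact absurd hh h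
  rw [PySem.Str.startswith_eq] at hR hL
  obtain ⟨tR, htR⟩ := (PySem.Chars.startswith_iff _ _).1 hR
  obtain ⟨tL, htL⟩ := (PySem.Chars.startswith_iff _ _).1 hL
  have hRl : "R".toList = ['R'] := rfl
  have hLl : "L".toList = ['L'] := rfl
  rw [hRl] at htR
  rw [hLl] at htL
  rw [← htR] at htL
  simp at htL

-- a parsed nonnegative amount: extract it
theorem pvAmt_nonneg (ins c : String) (h : 0 ≤ (pvAmt ins c).getD (-1)) :
    0 ≤ (pvAmt ins c).getD 0 := by
  cases hv : pvAmt ins c with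
  | none => simp
  | some v => rw [hv] at h; simpa using h

-- one instruction: A's step and B's step agree on position and counter, position stays in [0,100)
theorem step_eq (ins : String) (p z num : Int) (h0 : 0 ≤ p) (h1 : p < 100)
    (hR : PySem.Str.startswith ins "R" = true → 0 ≤ (pvAmt ins "R").getD (-1))
    (hL : PySem.Str.startswith ins "L" = true → 0 ≤ (pvAmt ins "L").getD (-1)) :
    (pvStepA ((p, z), num) ins).1.1 = (pvStepB (p, num) ins).1 ∧
    (pvStepA ((p, z), num) ins).2 = (pvStepB (p, num) ins).2 ∧
    0 ≤ (pvStepB (p, num) ins).1 ∧ (pvStepB (p, num) ins).1 < 100 := by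
  by_cases hr : PySem.Str.startswith ins "R" = true
  · have hl : PySem.Str.startswith ins "L" = false := not_start_RL ins hr
    have ha0 : 0 ≤ (pvAmt ins "R").getD 0 := pvAmt_nonneg ins "R" (hR hr)
    set a := (pvAmt ins "R").getD 0 with ha
    have hfst : (pvForward (p, z) a).1 = ((p + a) % 100) := by
      have hcast : a = ((a.toNat : Nat) : Int) := by omega
      rw [hcast, pvForward_fst a.toNat p z h0 h1]
    have hmod : PySem.Int.mod (p + a) 100 = ((p + a) % 100) :=
      PySem.Int.mod_eq_emod_of_pos (by norm_num)
    have hb : 0 ≤ ((p + a) % 100) ∧ ((p + a) % 100) < 100 :=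
      ⟨by omega, by omega⟩
    simp only [pvStepA, pvStepB, hr, hl, if_true, Bool.false_eq_true, if_false, ← ha]
    rw [hmod, hfst]
    refine ⟨?_, ?_, hb.1, hb.2⟩ <;> trivial
  · by_cases hl : PySem.Str.startswith ins "L" = true
    · have ha0 : 0 ≤ (pvAmt ins "L").getD 0 := pvAmt_nonneg ins "L" (hL hl)
      set a := (pvAmt ins "L").getD 0 with ha
      have hfst : (pvReverse (p, z) a).1 = ((p - a) % 100) := by
        have hcast : a = ((a.toNat : Nat) : Int) := by omega
        rw [hcast, pvReverse_fst a.toNat p z h0 h1]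
      have hmod : PySem.Int.mod (p - a) 100 = ((p - a) % 100) :=
        PySem.Int.mod_eq_emod_of_pos (by norm_num)
      have hb : 0 ≤ ((p - a) % 100) ∧ ((p - a) % 100) < 100 :=
        ⟨by omega, by omega⟩
      simp only [pvStepA, pvStepB, hr, hl, if_true, Bool.false_eq_true, if_false, ← ha]
      rw [hmod, hfst]
      refine ⟨?_, ?_, hb.1, hb.2⟩ <;> trivial
    · simp only [pvStepA, pvStepB, hr, hl, Bool.false_eq_true, if_false]
      refine ⟨?_, ?_, h0, h1⟩ <;> trivial

-- main loop invariant: A's fold and B's fold agree on the counter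
theorem loop_eq : ∀ (l : List String) (p z num : Int), 0 ≤ p → p < 100 →
    (∀ ins ∈ l,
      (PySem.Str.startswith ins "R" = true → 0 ≤ (pvAmt ins "R").getD (-1)) ∧
      (PySem.Str.startswith ins "L" = true → 0 ≤ (pvAmt ins "L").getD (-1))) →
    (l.foldl pvStepA ((p, z), num)).2 = (l.foldl pvStepB (p, num)).2 := by
  intro l
  induction l with
  | nil => intro p z num _ _ _; rfl
  | cons ins tl ih =>
    intro p z num h0 h1 hpre
    have hins := hpre ins (by simp)
    obtain ⟨heq1, heq2, hb0, hb1⟩ := step_eq ins p z num h0 h1 hins.1 hins.2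
    simp only [List.foldl_cons]
    have hA : pvStepA ((p, z), num) ins
        = (((pvStepA ((p, z), num) ins).1.1, (pvStepA ((p, z), num) ins).1.2),
            (pvStepA ((p, z), num) ins).2) := rfl
    have hB : pvStepB (p, num) ins
        = ((pvStepB (p, num) ins).1, (pvStepB (p, num) ins).2) := rfl
    rw [hA, hB, heq1, heq2]
    exact ih _ _ _ hb0 hb1 (fun i hi => hpre i (by simp [hi]))

-- ===== VERDICT (by name: the statement is the Claim_ definition above) =====
theorem solution_part_one_spec : Claim_equal_solution_part_one := by
  intro input _hdom hpre
  unfold Spec_solution_part_one solution_part_one solution_part_one_alt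
  exact loop_eq input 50 0 0 (by norm_num) (by norm_num) hpre
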